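-- pv_equiv track=rewrite | github.com/qzheng75/My_Data_Sci_Projects | Data Structure and Algorithms/GT CS 3510/Week 1/homework.py | compare_binary_numbers
-- ===== SOURCE A (Python) =====
-- from typing import List
--
-- def compare_binary_numbers(x: List[int], y: List[int]) -> str:
--     """
--     Compare two non-negative integers represented in binary format.
--
--     Given two non-negative integers, x and y, each stored as binary arrays of n bits,
--     this function determines their relationship: whether x is greater than y, y is greater than x,
--     or if they are equal.
--
--     Parameters:
--     - x (List[int]): Binary representation of the first non-negative integer.
--     - y (List[int]): Binary representation of the second non-negative integer.
--
--     Returns: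
--     - str: A string indicating the comparison result: 'x > y', 'x < y', or 'x = y'.
--
--     Constraints:
--     - Both input numbers have to be binary represented.
--     - The lengths of both input arrays x and y must be equal.
--
--     Time Complexity:
--     - Worst case: O(n)
--     """
--     assert all(i in {0, 1} for i in x), 'x is not a binary-represented number.'
--     assert all(i in {0, 1} for i in y), 'y is not a binary-represented number.'
--     assert len(x) == len(y), 'Numbers have to be represented in same number of bits.'
--     n = len(x)
--     for i in range(n):
--         if x[i] != y[i]:
--             return 'x > y' if x[i] == 1 else 'x < y'
--     return 'x = y'
-- ===== SOURCE B (Python) =====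
-- from typing import List
--
-- def compare_binary_numbers(x: List[int], y: List[int]) -> str:
--     assert all(i in {0, 1} for i in x), 'x is not a binary-represented number.'
--     assert all(i in {0, 1} for i in y), 'y is not a binary-represented number.'
--     assert len(x) == len(y), 'Numbers have to be represented in same number of bits.'
--     vx = 0
--     for b in x:
--         vx = vx * 2 + b
--     vy = 0
--     for b in y:
--         vy = vy * 2 + b
--     if vx == vy:
--         return 'x = y'
--     return 'x > y' if vx > vy else 'x < y'
-- ===== Notes on version B (the rewrite author's own statement) =====
-- stated objective: alternative
-- what changed: Replaces the early-exit MSB scan for the first differing bit with two Horner-rule passes that build each number's integer value, then one numeric comparison.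
import Mathlib
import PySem

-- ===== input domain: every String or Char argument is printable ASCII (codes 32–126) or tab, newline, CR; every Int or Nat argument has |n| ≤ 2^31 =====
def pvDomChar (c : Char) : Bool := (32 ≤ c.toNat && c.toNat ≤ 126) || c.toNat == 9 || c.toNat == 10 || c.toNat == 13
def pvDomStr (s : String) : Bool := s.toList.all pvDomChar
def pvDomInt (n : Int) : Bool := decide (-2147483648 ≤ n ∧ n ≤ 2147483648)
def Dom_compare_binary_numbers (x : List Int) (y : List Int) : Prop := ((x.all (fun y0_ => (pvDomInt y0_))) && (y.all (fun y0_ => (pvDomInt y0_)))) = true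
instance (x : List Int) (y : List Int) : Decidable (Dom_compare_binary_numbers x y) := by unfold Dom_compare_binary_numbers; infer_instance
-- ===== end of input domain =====

-- B replaces A's early-exit first-differing-bit scan with two Horner-rule value passes and one numeric comparison (alternative decomposition, same cost).


-- ===== PORT A =====
-- the for-loop over i in range(n): scan the two lists in step, return on the first differing bit
def compare_binary_numbers_loop : List Int → List Int → String
  | a :: xs, b :: ys =>
      if a ≠ b then (if a = 1 then "x > y" else "x < y")
      else compare_binary_numbers_loop xs ys
  | _, _ => "x = y"

def compare_binary_numbers (x : List Int) (y : List Int) : String :=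
  compare_binary_numbers_loop x y

-- ===== PORT B =====
-- vx = 0; for b in x: vx = vx*2 + b   (Horner's rule), likewise vy, then one comparison
def compare_binary_numbers_alt (x : List Int) (y : List Int) : String :=
  let vx := x.foldl (fun a b => a * 2 + b) 0
  let vy := y.foldl (fun a b => a * 2 + b) 0
  if vx = vy then "x = y"
  else if vx > vy then "x > y"
  else "x < y"

-- ===== PRECONDITION & SPEC =====
-- Pre_ excludes exactly the inputs on which A's three assertions raise AssertionError:
-- non-0/1 entries or unequal lengths.
def Pre_compare_binary_numbers (x : List Int) (y : List Int) : Prop :=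
  (∀ b ∈ x, b = 0 ∨ b = 1) ∧ (∀ b ∈ y, b = 0 ∨ b = 1) ∧ x.length = y.length
instance (x : List Int) (y : List Int) : Decidable (Pre_compare_binary_numbers x y) := by
  unfold Pre_compare_binary_numbers; infer_instance

def pvWitness_compare_binary_numbers : List Int × List Int := ([1, 0, 1], [1, 1, 0])

def Spec_compare_binary_numbers (x : List Int) (y : List Int) (out : String) : Prop := out = compare_binary_numbers_alt x y
instance (x : List Int) (y : List Int) (out : String) : Decidable (Spec_compare_binary_numbers x y out) := by unfold Spec_compare_binary_numbers; infer_instance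

-- ===== CLAIM (what is proved, stated in full; the proofs are below) =====
def Claim_equal_compare_binary_numbers : Prop := ∀ (x : List Int) (y : List Int), Dom_compare_binary_numbers x y → Pre_compare_binary_numbers x y → Spec_compare_binary_numbers x y (compare_binary_numbers x y)

-- ===== LEMMAS AND PROOFS =====

def pvHorner (l : List Int) : Int := l.foldl (fun a b => a * 2 + b) 0

lemma pvHorner_foldl : ∀ (l : List Int) (a : Int),
    l.foldl (fun a b => a * 2 + b) a = a * 2 ^ l.length + pvHorner l := by
  intro l
  induction l with
  | nil => intro a; simp [pvHorner]
  | cons b t ih =>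
      intro a
      simp only [List.foldl_cons, List.length_cons, pvHorner] at *
      rw [ih (a * 2 + b), ih (0 * 2 + b)]
      ring

lemma pvHorner_bounds : ∀ (l : List Int), (∀ b ∈ l, b = 0 ∨ b = 1) →
    0 ≤ pvHorner l ∧ pvHorner l < 2 ^ l.length := by
  intro l
  induction l with
  | nil => intro _; simp [pvHorner]
  | cons b t ih =>
      intro h
      have hb := h b (List.mem_cons_self ..)
      have ht := ih (fun c hc => h c (List.mem_cons_of_mem _ hc))
      have he : pvHorner (b :: t) = b * 2 ^ t.length + pvHorner t := by
        simp only [pvHorner, List.foldl_cons]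
        simpa using pvHorner_foldl t b
      rw [he]
      have hp : (0:Int) < 2 ^ t.length := by positivity
      rcases hb with rfl | rfl <;> simp [List.length_cons, pow_succ] <;> omega

lemma pv_main : ∀ (x y : List Int), (∀ b ∈ x, b = 0 ∨ b = 1) → (∀ b ∈ y, b = 0 ∨ b = 1) →
    x.length = y.length →
    compare_binary_numbers_loop x y = compare_binary_numbers_alt x y := by
  intro x
  induction x with
  | nil =>
      intro y _ _ hl
      have : y = [] := List.eq_nil_of_length_eq_zero hl.symm
      subst this
      simp [compare_binary_numbers_loop, compare_binary_numbers_alt]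
  | cons a xs ih =>
      intro y hx hy hl
      cases y with
      | nil => simp at hl
      | cons b ys =>
          have ha := hx a (List.mem_cons_self ..)
          have hb := hy b (List.mem_cons_self ..)
          have hxs := fun c hc => hx c (List.mem_cons_of_mem _ hc)
          have hys := fun c hc => hy c (List.mem_cons_of_mem _ hc)
          have hlen : xs.length = ys.length := by simpa using hl
          obtain ⟨hx0, hx1⟩ := pvHorner_bounds xs hxs
          obtain ⟨hy0, hy1⟩ := pvHorner_bounds ys hys
          rw [hlen] at hx1
          have hxv : List.foldl (fun a b => a * 2 + b) 0 xs = pvHorner xs := rfl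
          have hyv : List.foldl (fun a b => a * 2 + b) 0 ys = pvHorner ys := rfl
          have ex : (a :: xs).foldl (fun a b => a * 2 + b) 0 = a * 2 ^ xs.length + pvHorner xs := by
            simp only [List.foldl_cons]
            simpa using pvHorner_foldl xs (0 * 2 + a)
          have ey : (b :: ys).foldl (fun a b => a * 2 + b) 0 = b * 2 ^ ys.length + pvHorner ys := by
            simp only [List.foldl_cons]
            simpa using pvHorner_foldl ys (0 * 2 + b)
          have hp : (0:Int) < 2 ^ ys.length := by positivity
          by_cases hab : a = b
          · subst hab
            rw [show compare_binary_numbers_loop (a :: xs) (a :: ys) =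
                  compare_binary_numbers_loop xs ys from
                  by simp [compare_binary_numbers_loop],
                ih ys hxs hys hlen]
            simp only [compare_binary_numbers_alt, ex, ey, hlen, hxv, hyv]
            by_cases hv : pvHorner xs = pvHorner ys
            · simp [hv]
            · have c1 : ¬ (a * 2 ^ ys.length + pvHorner xs
                  = a * 2 ^ ys.length + pvHorner ys) := by omega
              rw [if_neg hv, if_neg c1]
              by_cases hgt : pvHorner ys < pvHorner xs
              · have c2 : a * 2 ^ ys.length + pvHorner ys
                    < a * 2 ^ ys.length + pvHorner xs := by omega
                rw [if_pos hgt, if_pos c2]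
              · have c2 : ¬ (a * 2 ^ ys.length + pvHorner ys
                    < a * 2 ^ ys.length + pvHorner xs) := by omega
                rw [if_neg hgt, if_neg c2]
          · rw [show compare_binary_numbers_loop (a :: xs) (b :: ys) =
                  (if a = 1 then "x > y" else "x < y") from
                  by simp [compare_binary_numbers_loop, hab]]
            simp only [compare_binary_numbers_alt, ex, ey, hlen]
            rcases ha with rfl | rfl <;> rcases hb with rfl | rfl
            · exact absurd rfl hab
            · have c1 : ¬ ((0:Int) * 2 ^ ys.length + pvHorner xs
                  = 1 * 2 ^ ys.length + pvHorner ys) := by omega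
              have c2 : ¬ ((1:Int) * 2 ^ ys.length + pvHorner ys
                  < 0 * 2 ^ ys.length + pvHorner xs) := by omega
              rw [if_neg (by norm_num : ¬ ((0:Int) = 1)), if_neg c1, if_neg c2]
            · have c1 : ¬ ((1:Int) * 2 ^ ys.length + pvHorner xs
                  = 0 * 2 ^ ys.length + pvHorner ys) := by omega
              have c2 : (0:Int) * 2 ^ ys.length + pvHorner ys
                  < 1 * 2 ^ ys.length + pvHorner xs := by omega
              rw [if_pos rfl, if_neg c1, if_pos c2]
            · exact absurd rfl hab

-- ===== VERDICT (by name: the statement is the Claim_ definition above) =====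
theorem compare_binary_numbers_spec : Claim_equal_compare_binary_numbers := by
  intro x y _ ⟨hx, hy, hl⟩
  unfold Spec_compare_binary_numbers compare_binary_numbers
  exact pv_main x y hx hy hl
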